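-- pv_equiv track=rewrite | github.com/AMReX-Codes/amrex | Tools/performance_tests/functions_perftest.py | scale_n_cell
-- ===== SOURCE A (Python) =====
-- def scale_n_cell(ncell, n_node):
--      ncell_scaled = ncell[:]
--      index_dim = 0
--      while n_node > 1:
--          ncell_scaled[index_dim] *= 2
--          n_node /= 2
--          index_dim = (index_dim+1) % 3
--      return ncell_scaled
-- ===== SOURCE B (Python) =====
-- def scale_n_cell(ncell, n_node):
--     # count the doublings: number of times n_node halves while still > 1 (ceil(log2) for n_node > 1)
--     k = 0
--     n = n_node
--     while n > 1:
--         n = (n + 1) // 2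
--         k += 1
--     q, r = divmod(k, 3)
--     # cyclic order gives the first k % 3 dimensions one extra doubling
--     return [c * 2 ** (q + (1 if i < r else 0)) for i, c in enumerate(ncell[:3])] + ncell[3:]
-- ===== Notes on version B (the rewrite author's own statement) =====
-- stated objective: simpler
-- what changed: Replaces A's interleaved cyclic mutation loop (which halves n_node with float division while doubling dimensions in round-robin) by counting the doublings k once with exact integer ceil-halving and applying a closed-form per-dimension exponent 2**(k//3 + (1 if i < k%3 else 0)) in a single comprehension.
import Mathlib
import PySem

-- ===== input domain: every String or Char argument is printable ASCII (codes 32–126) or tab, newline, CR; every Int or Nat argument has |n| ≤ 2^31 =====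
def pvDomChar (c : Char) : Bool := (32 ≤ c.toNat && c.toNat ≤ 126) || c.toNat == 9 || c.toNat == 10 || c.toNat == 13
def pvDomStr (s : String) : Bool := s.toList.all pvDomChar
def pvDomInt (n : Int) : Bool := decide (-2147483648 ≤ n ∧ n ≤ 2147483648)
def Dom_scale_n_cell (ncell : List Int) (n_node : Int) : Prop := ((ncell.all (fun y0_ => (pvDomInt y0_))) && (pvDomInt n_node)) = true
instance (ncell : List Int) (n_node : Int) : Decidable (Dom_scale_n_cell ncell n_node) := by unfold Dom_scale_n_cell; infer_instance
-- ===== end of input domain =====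

-- B replaces A's interleaved cyclic mutation loop by counting the doublings once and applying a
-- closed-form per-dimension exponent (objective: simpler). Equivalence is about the return value.

-- ===== PORT A =====
-- A's while loop; `n_node /= 2` is Python FLOAT division, modeled exactly with ℚ (halving an
-- integer of magnitude ≤ 2^31 is exact in binary floating point, so ℚ matches the float run).
-- `ncell_scaled[index_dim] *= 2` is ported as List.modify (a no-op out of range, where Python
-- raises IndexError; Pre_ excludes exactly those inputs).
-- Fuel: the loop runs ⌈log2 n_node⌉ ≤ n_node.natAbs times, so this fuel is never exhausted.
def pvLoopA : Nat → List Int → Nat → ℚ → List Int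
  | 0, cells, _, _ => cells
  | fuel+1, cells, idx, q =>
    if 1 < q then pvLoopA fuel (cells.modify idx (· * 2)) ((idx + 1) % 3) (q / 2)
    else cells

def scale_n_cell (ncell : List Int) (n_node : Int) : List Int :=
  pvLoopA n_node.natAbs ncell 0 (n_node : ℚ)

-- ===== PORT B =====
-- Source B's counting loop: while n > 1: n = (n + 1) // 2; k += 1   (same fuel argument as A's loop)
def pvCountB : Nat → Int → Int → Int
  | 0, _, k => k
  | fuel+1, n, k =>
    if 1 < n then pvCountB fuel (PySem.Int.floordiv (n + 1) 2) (k + 1) else k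

-- Source B: q, r = divmod(k, 3); [c * 2**(q + (1 if i < r else 0)) for i, c in enumerate(ncell[:3])] + ncell[3:]
-- (k ≥ 0 always, so the Python exponent q + (i<r) is a nonnegative int; .toNat is exact there)
def scale_n_cell_alt (ncell : List Int) (n_node : Int) : List Int :=
  let k := pvCountB n_node.natAbs n_node 0
  let q := PySem.Int.floordiv k 3
  let r := PySem.Int.mod k 3
  ((PySem.List.enumerate (PySem.List.slice ncell none (some 3))).map
      (fun p => p.2 * 2 ^ (q + if p.1 < r then 1 else 0).toNat))
    ++ PySem.List.slice ncell (some 3) none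

-- ===== PRECONDITION & SPEC =====
-- Pre_ excludes exactly the inputs on which Python A raises IndexError: fewer than 3 dimensions
-- while n_node needs more doublings than there are dimensions (n_node > 2^len).
def Pre_scale_n_cell (ncell : List Int) (n_node : Int) : Prop :=
  3 ≤ ncell.length ∨ n_node ≤ 2 ^ ncell.length
instance (ncell : List Int) (n_node : Int) : Decidable (Pre_scale_n_cell ncell n_node) := by
  unfold Pre_scale_n_cell; infer_instance
def pvWitness_scale_n_cell : List Int × Int := ([16, 16, 16], 8)

def Spec_scale_n_cell (ncell : List Int) (n_node : Int) (out : List Int) : Prop :=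
  out = scale_n_cell_alt ncell n_node
instance (ncell : List Int) (n_node : Int) (out : List Int) : Decidable (Spec_scale_n_cell ncell n_node out) := by unfold Spec_scale_n_cell; infer_instance

-- ===== CLAIM (what is proved, stated in full; the proofs are below) =====
def Claim_equal_scale_n_cell : Prop := ∀ (ncell : List Int) (n_node : Int), Dom_scale_n_cell ncell n_node → Pre_scale_n_cell ncell n_node → Spec_scale_n_cell ncell n_node (scale_n_cell ncell n_node)
-- ===== LEMMAS AND PROOFS =====

-- number of iterations A's loop performs
def pvStepsQ : Nat → ℚ → Nat
  | 0, _ => 0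
  | fuel+1, q => if 1 < q then pvStepsQ fuel (q / 2) + 1 else 0

-- A's loop as "m cyclic doubling steps"
def pvApplyM : List Int → Nat → Nat → List Int
  | cells, _, 0 => cells
  | cells, idx, m+1 => pvApplyM (cells.modify idx (· * 2)) ((idx + 1) % 3) m

-- how many of the m cyclic steps starting at idx hit position j
def pvCnt : Nat → Nat → Nat → Nat
  | _, 0, _ => 0
  | idx, m+1, j => (if idx = j then 1 else 0) + pvCnt ((idx + 1) % 3) m j

theorem pvLoopA_eq_applyM (fuel : Nat) : ∀ (cells : List Int) (idx : Nat) (q : ℚ),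
    pvLoopA fuel cells idx q = pvApplyM cells idx (pvStepsQ fuel q) := by
  induction fuel with
  | zero => intro cells idx q; rfl
  | succ fuel ih =>
    intro cells idx q
    simp only [pvLoopA, pvStepsQ]
    split_ifs with h
    · rw [ih]; rfl
    · rfl

theorem ceil_half (q : ℚ) : ⌈q / 2⌉ = PySem.Int.floordiv (⌈q⌉ + 1) 2 := by
  have hz := (PySem.Int.floordiv_eq_iff_of_pos (a := ⌈q⌉ + 1)
      (b := 2) (q := PySem.Int.floordiv (⌈q⌉ + 1) 2) (by norm_num)).mp rfl
  have h1 : q ≤ (⌈q⌉ : ℚ) := Int.le_ceil q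
  have h2 : (⌈q⌉ : ℚ) < q + 1 := Int.ceil_lt_add_one q
  have hm1 : ⌈q⌉ ≤ 2 * PySem.Int.floordiv (⌈q⌉ + 1) 2 := by omega
  have hm2 : 2 * PySem.Int.floordiv (⌈q⌉ + 1) 2 - 1 ≤ ⌈q⌉ := by omega
  rw [Int.ceil_eq_iff]
  constructor
  · have : ((2 * PySem.Int.floordiv (⌈q⌉ + 1) 2 - 1 : Int) : ℚ) ≤ (⌈q⌉ : ℚ) := by
      exact_mod_cast hm2
    push_cast at this ⊢
    linarith
  · have : ((⌈q⌉ : Int) : ℚ) ≤ ((2 * PySem.Int.floordiv (⌈q⌉ + 1) 2 : Int) : ℚ) := by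
      exact_mod_cast hm1
    push_cast at this ⊢
    linarith

theorem pvCountB_eq_steps (fuel : Nat) : ∀ (q : ℚ) (k : Int),
    pvCountB fuel ⌈q⌉ k = k + pvStepsQ fuel q := by
  induction fuel with
  | zero => intro q k; simp [pvCountB, pvStepsQ]
  | succ fuel ih =>
    intro q k
    simp only [pvCountB, pvStepsQ]
    have hcond : (1 < ⌈q⌉) ↔ (1 < q) := by
      rw [Int.lt_ceil]; norm_num
    split_ifs with h h' h'
    · rw [← ceil_half, ih]; push_cast; ring
    · exact absurd (hcond.mp h) h'
    · exact absurd (hcond.mpr h') h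
    · simp

theorem pvCountB_int (fuel : Nat) (n k : Int) :
    pvCountB fuel n k = k + pvStepsQ fuel (n : ℚ) := by
  have := pvCountB_eq_steps fuel (n : ℚ) k
  rwa [Int.ceil_intCast] at this

theorem pvApplyM_getElem? : ∀ (m : Nat) (cells : List Int) (idx j : Nat),
    (pvApplyM cells idx m)[j]? = cells[j]?.map (· * 2 ^ pvCnt idx m j) := by
  intro m
  induction m with
  | zero =>
    intro cells idx j
    simp [pvApplyM, pvCnt, Option.map_id']
  | succ m ih =>
    intro cells idx j
    rw [pvApplyM, ih, List.getElem?_modify, pvCnt]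
    cases cells[j]? <;> by_cases h : idx = j <;>
      simp [h, pow_add, pow_succ, mul_assoc]

theorem pvCnt_ge3 : ∀ (m idx j : Nat), idx < 3 → 3 ≤ j → pvCnt idx m j = 0 := by
  intro m
  induction m with
  | zero => intro idx j _ _; rfl
  | succ m ih =>
    intro idx j hidx hj
    rw [pvCnt, ih ((idx + 1) % 3) j (Nat.mod_lt _ (by norm_num)) hj, if_neg (by omega)]

theorem pvCnt_cycle : ∀ (m idx j : Nat), idx < 3 → j < 3 →
    pvCnt idx (m + 3) j = pvCnt idx m j + 1 := by
  intro m idx j hidx hj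
  show pvCnt idx (m + 1 + 1 + 1) j = _
  rw [pvCnt, pvCnt, pvCnt]
  have h3 : ((idx + 1) % 3 + 1) % 3 + 1 = idx + 3 ∨ (((idx + 1) % 3 + 1) % 3 + 1) % 3 = idx := by
    interval_cases idx <;> simp
  have hrw : (((idx + 1) % 3 + 1) % 3 + 1) % 3 = idx := by interval_cases idx <;> rfl
  rw [hrw]
  have hones : ((if idx = j then 1 else 0) + ((if (idx + 1) % 3 = j then 1 else 0)
      + ((if ((idx + 1) % 3 + 1) % 3 = j then 1 else 0) : Nat))) = 1 := by
    interval_cases idx <;> interval_cases j <;> rfl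
  omega

theorem pvCnt_lt3 : ∀ (s j : Nat), s < 3 → j < 3 →
    pvCnt 0 s j = if j < s then 1 else 0 := by
  intro s j hs hj
  interval_cases s <;> interval_cases j <;> rfl

theorem pvCnt_zero_char (m j : Nat) (hj : j < 3) :
    pvCnt 0 m j = m / 3 + if j < m % 3 then 1 else 0 := by
  induction m using Nat.strong_induction_on with
  | _ m ih =>
    by_cases h : m < 3
    · rw [pvCnt_lt3 m j h hj, Nat.div_eq_of_lt h, Nat.mod_eq_of_lt h]; omega
    · obtain ⟨m', rfl⟩ : ∃ m', m = m' + 3 := ⟨m - 3, by omega⟩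
      rw [pvCnt_cycle m' 0 j (by norm_num) hj, ih m' (by omega)]
      have h1 : (m' + 3) / 3 = m' / 3 + 1 := by omega
      have h2 : (m' + 3) % 3 = m' % 3 := by omega
      rw [h1, h2]; omega

-- B's rhs, elementwise
theorem alt_getElem? (ncell : List Int) (n_node : Int) (j : Nat) :
    (scale_n_cell_alt ncell n_node)[j]? =
      ncell[j]?.map (· * 2 ^ pvCnt 0 (pvStepsQ n_node.natAbs (n_node : ℚ)) j) := by
  have hk : pvCountB n_node.natAbs n_node 0
      = ((pvStepsQ n_node.natAbs (n_node : ℚ) : Nat) : Int) := by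
    rw [pvCountB_int]; simp
  set K := pvStepsQ n_node.natAbs (n_node : ℚ) with hK
  unfold scale_n_cell_alt
  rw [hk]
  simp only []
  have hq : PySem.Int.floordiv (K : Int) 3 = ((K / 3 : Nat) : Int) := by
    exact_mod_cast PySem.Int.floordiv_natCast K 3
  have hr : PySem.Int.mod (K : Int) 3 = ((K % 3 : Nat) : Int) := by
    exact_mod_cast PySem.Int.mod_natCast K 3
  have h3 : ((3 : Int)).toNat = 3 := rfl
  rw [hq, hr, PySem.List.slice_to ncell (by norm_num : (0:Int) ≤ 3),
    PySem.List.slice_from ncell (by norm_num : (0:Int) ≤ 3), h3]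
  set f : Int × Int → Int :=
    (fun p => p.2 * 2 ^ (((K / 3 : Nat) : Int) + if p.1 < ((K % 3 : Nat) : Int) then 1 else 0).toNat)
    with hf
  have hlen : ((PySem.List.enumerate (ncell.take 3)).map f).length = (ncell.take 3).length := by
    rw [List.length_map, PySem.List.length_enumerate]
  rw [List.getElem?_append]
  by_cases hjl : j < (ncell.take 3).length
  · rw [if_pos (by omega : j < ((PySem.List.enumerate (ncell.take 3)).map f).length)]
    have hj3 : j < 3 := lt_of_lt_of_le hjl (by simp)
    have hjn : j < ncell.length := by simp at hjl; omega
    rw [List.getElem?_map]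
    have henum : ∀ (l : List Int) (s : Int) (i : Nat), i < l.length →
        (PySem.List.enumerate l s)[i]? = some (s + (i : Int), l[i]!) := by
      intro l
      induction l with
      | nil => intro s i h; simp at h
      | cons x xs ihl =>
        intro s i h
        rw [PySem.List.enumerate_cons]
        cases i with
        | zero => simp
        | succ i =>
          rw [List.getElem?_cons_succ, ihl (s + 1) i (by simpa using h)]
          rw [List.getElem!_cons_succ]
          congr 2
          push_cast; ring
    rw [henum (ncell.take 3) 0 j hjl]
    have htake : (ncell.take 3)[j]! = ncell[j]! := by
      rw [List.getElem!_eq_getElem?_getD, List.getElem!_eq_getElem?_getD,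
        List.getElem?_take_of_lt hj3]
    have hexp : ((((K / 3 : Nat) : Int)) + if (0 + (j:Int)) < ((K % 3 : Nat) : Int) then 1 else 0).toNat
        = K / 3 + if j < K % 3 then 1 else 0 := by
      by_cases hlt : j < K % 3
      · rw [if_pos (by push_cast; omega), if_pos hlt]; omega
      · rw [if_neg (by push_cast; omega), if_neg hlt]; omega
    rw [List.getElem?_eq_getElem hjn]
    simp only [hf, Option.map_some, Option.some.injEq, hexp, htake]
    rw [pvCnt_zero_char K j hj3, List.getElem!_eq_getElem?_getD, List.getElem?_eq_getElem hjn]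
    rfl
  · rw [if_neg (by omega : ¬ j < ((PySem.List.enumerate (ncell.take 3)).map f).length), hlen,
      List.getElem?_drop]
    by_cases hge : 3 ≤ ncell.length
    · have hjt : (ncell.take 3).length = 3 := by rw [List.length_take]; omega
      rw [hjt] at hjl ⊢
      have h3j : 3 ≤ j := by omega
      rw [pvCnt_ge3 K 0 j (by norm_num) h3j]
      have hsum : 3 + (j - 3) = j := by omega
      rw [hsum]
      simp
    · have hjt : (ncell.take 3).length = ncell.length := by
        rw [List.length_take]; omega
      rw [hjt] at hjl ⊢
      rw [List.getElem?_eq_none (l := ncell) (by omega), List.getElem?_eq_none (by omega)]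
      rfl

-- ===== VERDICT (by name: the statement is the Claim_ definition above) =====
theorem scale_n_cell_spec : Claim_equal_scale_n_cell := by
  intro ncell n_node _ _
  unfold Spec_scale_n_cell scale_n_cell
  rw [pvLoopA_eq_applyM]
  apply List.ext_getElem?
  intro j
  rw [pvApplyM_getElem?, alt_getElem?]
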